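-- pv_equiv track=rewrite | github.com/lane-neuro/research-analytics-suite | research_analytics_suite/hardware_manager/interface/usb/USB.py | _parse_darwin_output
-- ===== SOURCE A (Python) =====
-- from typing import List, Dict, Any
--
-- def _parse_darwin_output(output: str) -> List[Dict[str, str]]:
--     """Parse the output from Darwin systems.
--
--     Args:
--         output (str): Raw output from the system command.
--
--     Returns:
--         list: Parsed information about detected devices.
--     """
--     devices = []
--     current_device = None
--     for line in output.split('\n'):
--         if 'Product ID' in line:
--             if current_device:
--                 devices.append(current_device)
--             current_device = {}
--         if current_device is not None:
--             if 'Product ID' in line: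
--                 current_device['product_id'] = line.split(':')[-1].strip()
--             elif 'Vendor ID' in line:
--                 current_device['vendor_id'] = line.split(':')[-1].strip().split()[0]
--                 current_device['vendor_name'] = ' '.join(line.split(':')[-1].strip().split()[1:])
--             elif 'Location ID' in line:
--                 current_device['location_id'] = line.split(':')[-1].strip()
--             elif 'Speed' in line:
--                 current_device['speed'] = line.split(':')[-1].strip()
--     if current_device:
--         devices.append(current_device)
--     return devices
-- ===== SOURCE B (Python) =====
-- from typing import List, Dict, Any
--
-- def _extract_block(block):
--     device = {}
--     for line in block:
--         if 'Product ID' in line: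
--             device['product_id'] = line.split(':')[-1].strip()
--         elif 'Vendor ID' in line:
--             device['vendor_id'] = line.split(':')[-1].strip().split()[0]
--             device['vendor_name'] = ' '.join(line.split(':')[-1].strip().split()[1:])
--         elif 'Location ID' in line:
--             device['location_id'] = line.split(':')[-1].strip()
--         elif 'Speed' in line:
--             device['speed'] = line.split(':')[-1].strip()
--     return device
--
-- def _parse_darwin_output(output: str) -> List[Dict[str, str]]:
--     blocks = []
--     current = None
--     for line in output.split('\n'):
--         if 'Product ID' in line:
--             if current is not None:
--                 blocks.append(current)
--             current = [line]
--         elif current is not None: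
--             current.append(line)
--     if current is not None:
--         blocks.append(current)
--     return [_extract_block(b) for b in blocks]
-- ===== Notes on version B (the rewrite author's own statement) =====
-- stated objective: alternative
-- what changed: B replaces A's single-pass loop that interleaves block detection with dict building by a two-phase decomposition: first partition the lines into device blocks (one per 'Product ID' line, dropping the preamble), then run the field-extraction pass over each block.
import Mathlib
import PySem

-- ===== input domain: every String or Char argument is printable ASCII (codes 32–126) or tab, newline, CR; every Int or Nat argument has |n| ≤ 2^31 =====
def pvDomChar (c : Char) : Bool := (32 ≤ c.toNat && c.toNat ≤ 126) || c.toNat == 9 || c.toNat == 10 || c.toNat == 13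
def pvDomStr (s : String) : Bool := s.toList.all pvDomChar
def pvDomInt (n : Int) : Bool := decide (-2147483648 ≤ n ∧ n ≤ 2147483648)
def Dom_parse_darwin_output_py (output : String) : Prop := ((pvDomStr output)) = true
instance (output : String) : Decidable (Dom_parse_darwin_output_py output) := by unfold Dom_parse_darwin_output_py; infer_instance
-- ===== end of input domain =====

-- B re-implements A's single-pass dict-building loop as a two-phase decomposition (partition the
-- lines into device blocks, then a field-extraction pass per block); same return value as A (objective: alternative).

-- ===== PORT A =====
-- line.split(':')[-1].strip()  (split(':') is always nonempty, so the [-1] never misses; getD "" is unreachable)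
def pvSegA (line : String) : String :=
  PySem.Str.strip ((PySem.List.pyGet? ((PySem.Str.split? line ":").getD []) (-1)).getD "")

def pvStepA (st : List (PySem.Dict String String) × Option (PySem.Dict String String)) (line : String) :
    List (PySem.Dict String String) × Option (PySem.Dict String String) :=
  let devices := st.1
  let cur := st.2
  let devices :=
    if PySem.Str.isIn "Product ID" line then
      match cur with
      | some d => if d.items.isEmpty then devices else devices ++ [d]
      | none => devices
    else devices
  let cur := if PySem.Str.isIn "Product ID" line then some PySem.Dict.empty else cur
  match cur with
  | none => (devices, none)
  | some d =>
    if PySem.Str.isIn "Product ID" line then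
      (devices, some (d.insert "product_id" (pvSegA line)))
    else if PySem.Str.isIn "Vendor ID" line then
      -- Python's split()[0] raises IndexError when the segment has no words; Pre_ excludes those inputs, so getD "" is unreachable
      (devices, some ((d.insert "vendor_id" ((PySem.List.pyGet? (PySem.Str.split₀ (pvSegA line)) 0).getD "")).insert "vendor_name"
        (PySem.Str.join " " (PySem.List.slice (PySem.Str.split₀ (pvSegA line)) (some 1) none))))
    else if PySem.Str.isIn "Location ID" line then
      (devices, some (d.insert "location_id" (pvSegA line)))
    else if PySem.Str.isIn "Speed" line then
      (devices, some (d.insert "speed" (pvSegA line)))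
    else (devices, some d)

def parse_darwin_output_py (output : String) : List (List (String × String)) :=
  let st := ((PySem.Str.split? output "\n").getD []).foldl pvStepA ([], none)
  let devices :=
    match st.2 with
    | some d => if d.items.isEmpty then st.1 else st.1 ++ [d]
    | none => st.1
  devices.map PySem.Dict.items

-- ===== PORT B =====
def pvSegB (line : String) : String :=
  PySem.Str.strip ((PySem.List.pyGet? ((PySem.Str.split? line ":").getD []) (-1)).getD "")

def pvExtractLine (d : PySem.Dict String String) (line : String) : PySem.Dict String String :=
  if PySem.Str.isIn "Product ID" line then
    d.insert "product_id" (pvSegB line)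
  else if PySem.Str.isIn "Vendor ID" line then
    -- same split()[0]: B raises exactly where A does; getD "" unreachable inside Pre_
    (d.insert "vendor_id" ((PySem.List.pyGet? (PySem.Str.split₀ (pvSegB line)) 0).getD "")).insert "vendor_name"
      (PySem.Str.join " " (PySem.List.slice (PySem.Str.split₀ (pvSegB line)) (some 1) none))
  else if PySem.Str.isIn "Location ID" line then
    d.insert "location_id" (pvSegB line)
  else if PySem.Str.isIn "Speed" line then
    d.insert "speed" (pvSegB line)
  else d

def pvExtractBlock (b : List String) : PySem.Dict String String :=
  b.foldl pvExtractLine PySem.Dict.empty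

def pvBlkStep (st : List (List String) × Option (List String)) (line : String) :
    List (List String) × Option (List String) :=
  if PySem.Str.isIn "Product ID" line then
    ((match st.2 with | some c => st.1 ++ [c] | none => st.1), some [line])
  else
    match st.2 with
    | some c => (st.1, some (c ++ [line]))
    | none => (st.1, none)

def parse_darwin_output_py_alt (output : String) : List (List (String × String)) :=
  let st := ((PySem.Str.split? output "\n").getD []).foldl pvBlkStep ([], none)
  let blocks :=
    match st.2 with
    | some c => st.1 ++ [c]
    | none => st.1
  blocks.map (fun b => (pvExtractBlock b).items)

-- ===== PRECONDITION & SPEC =====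
-- helper for Pre_ only (not used by either port): this line contains 'Vendor ID' (not 'Product ID')
-- and its stripped last colon segment has no words, so Python's split()[0] raises IndexError there
def pvVendBad (l : String) : Bool :=
  PySem.Str.isIn "Vendor ID" l && !(PySem.Str.isIn "Product ID" l) &&
    (PySem.Str.split₀ (PySem.Str.strip ((PySem.List.pyGet? ((PySem.Str.split? l ":").getD []) (-1)).getD ""))).isEmpty

-- Pre_ excludes exactly the inputs where both Pythons raise IndexError: a wordless 'Vendor ID' line
-- occurring at or after a 'Product ID' line (i.e. inside a device block).
def Pre_parse_darwin_output_py (output : String) : Prop :=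
  ∀ j : Nat, j < ((PySem.Str.split? output "\n").getD []).length →
    pvVendBad (((PySem.Str.split? output "\n").getD []).getD j "") = true →
    ∀ i : Nat, i ≤ j → PySem.Str.isIn "Product ID" (((PySem.Str.split? output "\n").getD []).getD i "") = false
instance (output : String) : Decidable (Pre_parse_darwin_output_py output) := by
  unfold Pre_parse_darwin_output_py; infer_instance

def pvWitness_parse_darwin_output_py : String := "Product ID: 0x1a\nVendor ID: 0x5ac Apple Inc.\nSpeed: 480"

def Spec_parse_darwin_output_py (output : String) (out : List (List (String × String))) : Prop := out = parse_darwin_output_py_alt output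
instance (output : String) (out : List (List (String × String))) : Decidable (Spec_parse_darwin_output_py output out) := by unfold Spec_parse_darwin_output_py; infer_instance

-- ===== CLAIM (what is proved, stated in full; the proofs are below) =====
def Claim_equal_parse_darwin_output_py : Prop := ∀ (output : String), Dom_parse_darwin_output_py output → Pre_parse_darwin_output_py output → Spec_parse_darwin_output_py output (parse_darwin_output_py output)

-- ===== LEMMAS AND PROOFS =====

theorem pv_seg_eq : pvSegB = pvSegA := rfl

-- inserting never empties a dict's items
theorem pv_items_insert_ne_nil (d : PySem.Dict String String) (k v : String) :
    (d.insert k v).items ≠ [] := by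
  rw [PySem.Dict.items_insert]
  split
  · rename_i h
    intro hnil
    simp only [List.map_eq_nil_iff] at hnil
    rw [PySem.Dict.contains_iff_mem_keys] at h
    rw [show d.keys = d.items.map Prod.fst from rfl, hnil] at h
    simp at h
  · simp

-- pvExtractLine preserves nonemptiness of the items list
theorem pv_extractLine_ne_nil (d : PySem.Dict String String) (l : String)
    (h : d.items ≠ []) : (pvExtractLine d l).items ≠ [] := by
  unfold pvExtractLine
  repeat' split
  all_goals first
    | exact pv_items_insert_ne_nil _ _ _
    | exact h

theorem pv_extractBlock_append (c : List String) (l : String) :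
    pvExtractBlock (c ++ [l]) = pvExtractLine (pvExtractBlock c) l := by
  simp [pvExtractBlock, List.foldl_append]

-- the two finalizers (proof-local names for the trailing 'if current: append' of each port)
def pvFinA (st : List (PySem.Dict String String) × Option (PySem.Dict String String)) :
    List (PySem.Dict String String) :=
  match st.2 with
  | some d => if d.items.isEmpty then st.1 else st.1 ++ [d]
  | none => st.1

def pvFinB (st : List (List String) × Option (List String)) : List (List String) :=
  match st.2 with
  | some c => st.1 ++ [c]
  | none => st.1

-- A's no-new-block step is exactly one extraction step on the current dict
theorem pv_stepA_cont (devs : List (PySem.Dict String String)) (d : PySem.Dict String String)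
    (l : String) (hp : PySem.Str.isIn "Product ID" l = false) :
    pvStepA (devs, some d) l = (devs, some (pvExtractLine d l)) := by
  unfold pvStepA pvExtractLine
  rw [pv_seg_eq, hp]
  split_ifs <;> first | rfl | simp_all

-- A's step on a 'Product ID' line, empty current: just start extracting afresh
theorem pv_stepA_prod_none (devs : List (PySem.Dict String String)) (l : String)
    (hp : PySem.Str.isIn "Product ID" l = true) :
    pvStepA (devs, none) l = (devs, some (pvExtractLine PySem.Dict.empty l)) := by
  unfold pvStepA pvExtractLine
  rw [pv_seg_eq, hp]
  split_ifs <;> first | rfl | simp_all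

-- A's step on a 'Product ID' line: flush the (nonempty) current dict and start afresh
theorem pv_stepA_prod_some (devs : List (PySem.Dict String String))
    (d : PySem.Dict String String) (l : String)
    (hp : PySem.Str.isIn "Product ID" l = true) (hd : d.items.isEmpty = false) :
    pvStepA (devs, some d) l = (devs ++ [d], some (pvExtractLine PySem.Dict.empty l)) := by
  simp only [pvStepA, pvExtractLine, pv_seg_eq, hp, hd, Bool.false_eq_true,
    if_true, if_false]

theorem pv_blkStep_cont_none (bs : List (List String)) (l : String)
    (hp : PySem.Str.isIn "Product ID" l = false) :
    pvBlkStep (bs, none) l = (bs, none) := by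
  unfold pvBlkStep; rw [hp]; rfl

theorem pv_blkStep_cont_some (bs : List (List String)) (c : List String) (l : String)
    (hp : PySem.Str.isIn "Product ID" l = false) :
    pvBlkStep (bs, some c) l = (bs, some (c ++ [l])) := by
  unfold pvBlkStep; rw [hp]; rfl

theorem pv_blkStep_prod_none (bs : List (List String)) (l : String)
    (hp : PySem.Str.isIn "Product ID" l = true) :
    pvBlkStep (bs, none) l = (bs, some [l]) := by
  unfold pvBlkStep; rw [hp]; rfl

theorem pv_blkStep_prod_some (bs : List (List String)) (c : List String) (l : String)
    (hp : PySem.Str.isIn "Product ID" l = true) :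
    pvBlkStep (bs, some c) l = (bs ++ [c], some [l]) := by
  unfold pvBlkStep; rw [hp]; rfl

-- a block that starts with a 'Product ID' line extracts to a nonempty dict
theorem pv_extract_single_ne_nil (l : String) (hp : PySem.Str.isIn "Product ID" l = true) :
    (pvExtractBlock [l]).items ≠ [] := by
  show (pvExtractLine PySem.Dict.empty l).items ≠ []
  unfold pvExtractLine
  rw [hp, if_pos rfl]
  exact pv_items_insert_ne_nil _ _ _

-- coupled-loop invariant: A's fold state is B's fold state mapped through block extraction
theorem pv_main (ls : List String) (bs : List (List String)) (cur : Option (List String))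
    (hne : ∀ c, cur = some c → (pvExtractBlock c).items ≠ []) :
    pvFinA (ls.foldl pvStepA (bs.map pvExtractBlock, cur.map pvExtractBlock)) =
      (pvFinB (ls.foldl pvBlkStep (bs, cur))).map pvExtractBlock := by
  induction ls generalizing bs cur with
  | nil =>
    cases cur with
    | none => rfl
    | some c =>
      simp only [pvFinA, pvFinB, Option.map_some, List.foldl_nil, List.map_append, List.map_cons,
        List.map_nil]
      rw [if_neg (by simpa [List.isEmpty_iff] using hne c rfl)]
  | cons l ls ih =>
    by_cases hp : PySem.Str.isIn "Product ID" l = true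
    · cases cur with
      | none =>
        rw [List.foldl_cons, List.foldl_cons, Option.map_none, pv_stepA_prod_none _ _ hp,
          pv_blkStep_prod_none _ _ hp]
        have := ih bs (some [l]) (by intro c hc; cases hc; exact pv_extract_single_ne_nil l hp)
        simpa [pvExtractBlock] using this
      | some c =>
        have hd : (pvExtractBlock c).items.isEmpty = false := by
          simpa [List.isEmpty_iff] using hne c rfl
        rw [List.foldl_cons, List.foldl_cons, Option.map_some, pv_stepA_prod_some _ _ _ hp hd,
          pv_blkStep_prod_some _ _ _ hp]
        have := ih (bs ++ [c]) (some [l]) (by intro c' hc'; cases hc'; exact pv_extract_single_ne_nil l hp)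
        simpa [pvExtractBlock] using this
    · rw [Bool.not_eq_true] at hp
      cases cur with
      | none =>
        rw [List.foldl_cons, List.foldl_cons, Option.map_none, pv_blkStep_cont_none _ _ hp]
        have hA : pvStepA (bs.map pvExtractBlock, none) l = (bs.map pvExtractBlock, none) := by
          unfold pvStepA; rw [hp]; rfl
        rw [hA]
        exact ih bs none (by intro c hc; cases hc)
      | some c =>
        rw [List.foldl_cons, List.foldl_cons, Option.map_some, pv_stepA_cont _ _ _ hp,
          pv_blkStep_cont_some _ _ _ hp]
        have := ih bs (some (c ++ [l]))
          (by intro c' hc'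
              cases hc'
              rw [pv_extractBlock_append]
              exact pv_extractLine_ne_nil _ _ (hne c rfl))
        simpa [pv_extractBlock_append] using this

-- ===== VERDICT (by name: the statement is the Claim_ definition above) =====
theorem parse_darwin_output_py_spec : Claim_equal_parse_darwin_output_py := by
  intro output _ _
  show parse_darwin_output_py output = parse_darwin_output_py_alt output
  have h := pv_main ((PySem.Str.split? output "\n").getD []) [] none (by intro c hc; cases hc)
  simp only [List.map_nil, Option.map_none] at h
  show (pvFinA (((PySem.Str.split? output "\n").getD []).foldl pvStepA ([], none))).map PySem.Dict.items =
    (pvFinB (((PySem.Str.split? output "\n").getD []).foldl pvBlkStep ([], none))).map (fun b => (pvExtractBlock b).items)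
  rw [h, List.map_map]
  rfl
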